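-- pv_equiv track=rewrite | github.com/intentionet/netconan | conan/conan/ip_anonymization.py | _is_mask
-- ===== SOURCE A (Python) =====
-- def _is_mask(possible_mask_int, length):
--     """Determine if the input int is a mask or not.
--
--     If the binary representation starts with all 1s and ends with all 0s
--     (or starts with 0s and ends with 1s), then we assume it is a mask.
--
--     Counting the number of times consecutive bits do not match (transitions)
--     gives us a reasonable idea of whether or not something is a mask.  With 0
--     or 1 transitions, assume the value is a mask.
--     e.g. 1100 has only one place where consecutive bits don't match
--          0000 has zero
--          0110 has two
--          0101 has three
--     """
--     prev_bit = possible_mask_int & 1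
--     flipped = False
--     for pos in range(1, length):
--         cur_bit = (possible_mask_int >> pos) & 1
--         if prev_bit != cur_bit:
--             if flipped:
--                 return False
--             else:
--                 flipped = True
--         prev_bit = cur_bit
--
--     return True
-- ===== SOURCE B (Python) =====
-- def _is_mask(possible_mask_int, length):
--     if length <= 1:
--         return True
--     y = (possible_mask_int ^ (possible_mask_int >> 1)) & ((1 << (length - 1)) - 1)
--     return bin(y).count('1') <= 1
-- ===== Notes on version B (the rewrite author's own statement) =====
-- stated objective: faster
-- what changed: Replaces the per-bit transition-scanning loop (prev_bit/flipped state, early return) by a closed-form bit manipulation: mask (x ^ (x >> 1)) to the low length-1 bits and test popcount <= 1.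
import Mathlib
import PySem

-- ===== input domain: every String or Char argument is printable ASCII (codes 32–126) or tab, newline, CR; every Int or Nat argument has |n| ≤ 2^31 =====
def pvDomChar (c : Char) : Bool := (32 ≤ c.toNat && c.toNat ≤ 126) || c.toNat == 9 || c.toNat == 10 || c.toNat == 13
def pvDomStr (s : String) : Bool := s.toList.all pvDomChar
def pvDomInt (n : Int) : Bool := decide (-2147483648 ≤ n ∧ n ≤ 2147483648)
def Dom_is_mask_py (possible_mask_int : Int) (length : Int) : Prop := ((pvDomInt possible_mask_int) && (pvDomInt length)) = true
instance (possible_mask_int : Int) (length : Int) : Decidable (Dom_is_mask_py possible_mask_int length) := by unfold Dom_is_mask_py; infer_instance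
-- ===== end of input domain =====

-- B replaces A's per-bit transition-scanning loop (prev_bit/flipped state, early return) by a
-- closed-form bit manipulation: popcount((x ^ (x >> 1)) masked to the low length-1 bits) ≤ 1.

-- ===== PORT A =====
-- A-side helper: the for-loop of A as structural recursion, with its early 'return False'
def isMaskLoop (possible_mask_int : Int) (length : Int) (pos : Int)
    (prev_bit : Int) (flipped : Bool) : Bool :=
  if h : pos < length then
    let cur_bit := PySem.Int.band (possible_mask_int >>> pos.toNat) 1
    if prev_bit ≠ cur_bit then
      if flipped then false
      else isMaskLoop possible_mask_int length (pos + 1) cur_bit true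
    else isMaskLoop possible_mask_int length (pos + 1) cur_bit flipped
  else true
termination_by (length - pos).toNat
decreasing_by all_goals omega


def is_mask_py (possible_mask_int : Int) (length : Int) : Bool :=
  isMaskLoop possible_mask_int length 1 (PySem.Int.band possible_mask_int 1) false


-- ===== PORT B =====
def is_mask_py_alt (possible_mask_int : Int) (length : Int) : Bool :=
  if length ≤ 1 then true
  else
    -- here length - 1 ≥ 1, so Python's shift count 'length - 1' is (length - 1).toNat exactly;
    -- y ≥ 0, so Python's bin(y).count('1') is PySem.Int.bitCount y
    let y := PySem.Int.band (PySem.Int.bxor possible_mask_int (possible_mask_int >>> (1 : Nat)))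
               ((1 <<< (length - 1).toNat) - 1)
    decide (PySem.Int.bitCount y ≤ 1)

-- ===== PRECONDITION & SPEC =====
def Spec_is_mask_py (possible_mask_int : Int) (length : Int) (out : Bool) : Prop := out = is_mask_py_alt possible_mask_int length
instance (possible_mask_int : Int) (length : Int) (out : Bool) : Decidable (Spec_is_mask_py possible_mask_int length out) := by unfold Spec_is_mask_py; infer_instance

-- ===== CLAIM (what is proved, stated in full; the proofs are below) =====
def Claim_equal_is_mask_py : Prop := ∀ (possible_mask_int : Int) (length : Int), Dom_is_mask_py possible_mask_int length → Spec_is_mask_py possible_mask_int length (is_mask_py possible_mask_int length)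

-- ===== LEMMAS AND PROOFS =====

theorem natTestBit_char (m k : Nat) : m.testBit k = decide ((m >>> k) % 2 = 1) := by
  have h := Nat.testBit_shiftRight (i := k) (j := 0) m
  rw [Nat.add_zero] at h
  rw [← h, Nat.testBit_zero]

def pvBit (x : Int) (k : Nat) : Int := PySem.Int.band (x >>> k) 1

theorem pvBit_eq (x : Int) (k : Nat) : pvBit x k = if x.testBit k then 1 else 0 := by
  cases x with
  | ofNat m =>
      have hsh : (Int.ofNat m) >>> k = ((m >>> k : Nat) : Int) := by
        simp [Int.natCast_shiftRight]
      rw [pvBit, hsh]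
      have h1 : PySem.Int.band ((m >>> k : Nat) : Int) ((1:Nat):Int) = (((m >>> k) &&& 1 : Nat) : Int) :=
        PySem.Int.band_natCast _ _
      simp only [Nat.cast_one] at h1
      rw [h1, Nat.and_one_is_mod, Int.testBit, natTestBit_char]
      rcases Nat.mod_two_eq_zero_or_one (m >>> k) with h | h <;> simp [h]
  | negSucc m =>
      have hsh : (Int.negSucc m) >>> k = Int.negSucc (m >>> k) := rfl
      rw [pvBit, hsh, PySem.Int.band_one, PySem.Int.mod_eq_emod_of_pos (by norm_num)]
      rw [Int.testBit]
      have hns : Int.negSucc (m >>> k) = -((m >>> k : Nat) : Int) - 1 := by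
        rw [Int.negSucc_eq]; ring
      rw [hns, natTestBit_char]
      generalize m >>> k = j
      rcases Nat.mod_two_eq_zero_or_one j with h | h <;>
        { rw [h]; norm_num; omega }

def pvTrans (x : Int) (k : Nat) : Bool := x.testBit (k + 1) != x.testBit k
def pvCnt (x : Int) (n : Nat) : Nat := (List.range n).countP (pvTrans x)
def pvW (x : Int) : Nat := if 0 ≤ x then x.toNat else (-x - 1).toNat

theorem pvBit_ne_iff (x : Int) (k : Nat) :
    (pvBit x k ≠ pvBit x (k + 1)) ↔ pvTrans x k = true := by
  rw [pvBit_eq, pvBit_eq, pvTrans]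
  cases h1 : x.testBit k <;> cases h2 : x.testBit (k + 1) <;> simp [h1, h2]

theorem vbit (x : Int) (k : Nat) :
    (pvW x ^^^ (pvW x >>> 1)).testBit k = pvTrans x k := by
  rw [Nat.testBit_xor, Nat.testBit_shiftRight, pvTrans]
  cases x with
  | ofNat m =>
      have : pvW (Int.ofNat m) = m := by simp [pvW]
      rw [this, Int.testBit, Int.testBit, Nat.add_comm 1 k, Bool.xor_comm]
  | negSucc m =>
      have : pvW (Int.negSucc m) = m := by
        rw [pvW, if_neg ((Int.negSucc_not_nonneg m).mp), Int.negSucc_eq]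
        omega
      rw [this, Int.testBit, Int.testBit, Nat.add_comm 1 k]
      cases hm : m.testBit k <;> cases hm2 : m.testBit (k+1) <;> simp [hm, hm2]

theorem bxor_shift (x : Int) :
    PySem.Int.bxor x (x >>> (1 : Nat)) = ((pvW x ^^^ (pvW x >>> 1) : Nat) : Int) := by
  cases x with
  | ofNat m =>
      have hsh : (Int.ofNat m) >>> (1:Nat) = ((m >>> 1 : Nat) : Int) := by
        simp [Int.natCast_shiftRight]
      have hW : pvW (Int.ofNat m) = m := by simp [pvW]
      rw [hsh, hW]
      exact PySem.Int.bxor_natCast m (m >>> 1)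
  | negSucc m =>
      have hsh : (Int.negSucc m) >>> (1:Nat) = Int.negSucc (m >>> 1) := rfl
      have hW : pvW (Int.negSucc m) = m := by
        rw [pvW, if_neg ((Int.negSucc_not_nonneg m).mp), Int.negSucc_eq]
        omega
      rw [hsh, hW, PySem.Int.bxor]
      rw [if_neg ((Int.negSucc_not_nonneg m).mp), if_neg ((Int.negSucc_not_nonneg (m >>> 1)).mp)]
      have e1 : (-Int.negSucc m - 1).toNat = m := by rw [Int.negSucc_eq]; omega
      have e2 : (-Int.negSucc (m >>> 1) - 1).toNat = m >>> 1 := by rw [Int.negSucc_eq]; omega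
      rw [e1, e2]

theorem pvPop (n : Nat) : ∀ m : Nat, m < 2 ^ n →
    PySem.Int.bitCount (m : Int) = (List.range n).countP m.testBit := by
  induction n with
  | zero =>
      intro m hm
      interval_cases m
      simp [PySem.Int.bitCount_zero]
  | succ n ih =>
      intro m hm
      rcases Nat.eq_zero_or_pos m with rfl | hpos
      · rw [Nat.cast_zero, PySem.Int.bitCount_zero]
        symm
        rw [List.countP_eq_zero]
        intro a _
        simp [Nat.zero_testBit]
      · rw [PySem.Int.bitCount_natCast hpos, List.range_succ_eq_map, List.countP_cons,
          List.countP_map]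
        have hdiv : m / 2 < 2 ^ n := by
          have : 2 ^ (n+1) = 2 * 2 ^ n := by ring
          omega
        rw [ih (m / 2) hdiv]
        have hcomp : (m.testBit ∘ Nat.succ) = (m / 2).testBit := by
          funext k; simp [Function.comp, Nat.testBit_succ]
        rw [hcomp, Nat.testBit_zero]
        rcases Nat.mod_two_eq_zero_or_one m with h | h <;> simp [h] <;> omega

theorem B_eq (x L : Int) (h : ¬ L ≤ 1) :
    is_mask_py_alt x L = decide (pvCnt x (L - 1).toNat ≤ 1) := by
  unfold is_mask_py_alt
  rw [if_neg h]
  dsimp only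
  have hv := bxor_shift x
  set n := (L - 1).toNat with hn
  set v := pvW x ^^^ (pvW x >>> 1) with hvdef
  have hmask : (((1 <<< n : Nat)) : Int) - 1 = (((2 ^ n - 1 : Nat)) : Int) := by
    rw [Nat.one_shiftLeft]
    have : (1:Nat) ≤ 2 ^ n := Nat.one_le_two_pow
    push_cast [this]
    ring
  rw [hv, hmask, PySem.Int.band_natCast, Nat.and_two_pow_sub_one_eq_mod]
  have hlt : v % 2 ^ n < 2 ^ n := Nat.mod_lt _ (Nat.two_pow_pos n)
  rw [pvPop n _ hlt]
  have hcnt : (List.range n).countP (v % 2 ^ n).testBit = pvCnt x n := by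
    rw [pvCnt]
    apply List.countP_congr
    intro a ha
    rw [List.mem_range] at ha
    rw [Nat.testBit_mod_two_pow]
    simp only [ha, decide_true, Bool.true_and]
    rw [hvdef, vbit x a]
  rw [hcnt]

def tcnt (x : Int) (p : Nat) (m : Nat) : Nat := (List.range m).countP (fun i => pvTrans x (p + i))

theorem tcnt_succ_front (x : Int) (p m : Nat) :
    tcnt x p (m + 1) = (if pvTrans x p then 1 else 0) + tcnt x (p + 1) m := by
  rw [tcnt, List.range_succ_eq_map, List.countP_cons, List.countP_map, tcnt]
  have hf : ((fun i => pvTrans x (p + i)) ∘ Nat.succ) = (fun i => pvTrans x (p + 1 + i)) := by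
    funext i
    simp only [Function.comp]
    congr 1
    omega
  rw [hf]
  simp [Nat.add_comm]


theorem loop_char (m : Nat) : ∀ (x L : Int) (p : Nat) (flipped : Bool),
    (L - ((p : Int) + 1)).toNat = m →
    isMaskLoop x L ((p : Int) + 1) (pvBit x p) flipped =
      decide (tcnt x p m ≤ (if flipped then 0 else 1)) := by
  induction m with
  | zero =>
      intro x L p flipped hm
      rw [isMaskLoop, dif_neg (by omega)]
      have : tcnt x p 0 = 0 := rfl
      rw [this]
      split <;> simp
  | succ m ih =>
      intro x L p flipped hm
      rw [isMaskLoop, dif_pos (by omega)]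
      have hcur : PySem.Int.band (x >>> (((p : Int) + 1).toNat)) 1 = pvBit x (p + 1) := by
        have h1 : ((p : Int) + 1).toNat = p + 1 := by omega
        rw [h1, pvBit]
      rw [hcur]
      have harg : ((p : Int) + 1) + 1 = (((p + 1 : Nat) : Int)) + 1 := by push_cast; ring
      rw [tcnt_succ_front]
      by_cases ht : pvTrans x p = true
      · have hne : pvBit x p ≠ pvBit x (p + 1) := (pvBit_ne_iff x p).mpr ht
        rw [if_pos hne]
        cases flipped with
        | true => simp [ht]
        | false =>
            rw [if_neg (by simp), harg, ih x L (p + 1) true (by omega)]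
            simp [ht]
  -- last case
      · have heq : ¬ (pvBit x p ≠ pvBit x (p + 1)) := by
          rw [pvBit_ne_iff]
          simpa using ht
        have ht2 : pvTrans x p = false := by simpa using ht
        rw [if_neg heq, harg, ih x L (p + 1) flipped (by omega)]
        simp [ht2]

theorem A_eq (x L : Int) : is_mask_py x L = decide (pvCnt x (L - 1).toNat ≤ 1) := by
  rw [is_mask_py]
  have h0 : PySem.Int.band x 1 = pvBit x 0 := by rw [pvBit]; norm_num
  have h1 : isMaskLoop x L 1 (pvBit x 0) false
      = isMaskLoop x L (((0 : Nat) : Int) + 1) (pvBit x 0) false := by norm_num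
  rw [h0, h1, loop_char (L - 1).toNat x L 0 false (by omega)]
  have h2 : tcnt x 0 (L - 1).toNat = pvCnt x (L - 1).toNat := by
    rw [tcnt, pvCnt]
    apply List.countP_congr
    intro a _
    simp [pvTrans]
  rw [h2]
  simp

-- ===== VERDICT (by name: the statement is the Claim_ definition above) =====
theorem is_mask_py_spec : Claim_equal_is_mask_py := by
  intro x L _
  unfold Spec_is_mask_py
  by_cases h : L ≤ 1
  · rw [is_mask_py, isMaskLoop, dif_neg (by omega), is_mask_py_alt, if_pos h]
  · rw [A_eq, B_eq x L h]
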